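-- pv_equiv track=rewrite | github.com/sspamss/CodingChallenges | Codédex/daylight_savings.py | calculate_sleep_debt
-- ===== SOURCE A (Python) =====
-- def calculate_sleep_debt(planned, actual):
--   # Start at 1 due to daylight savings; track current sleep debt streak; track highest sleep debt streak
--   sleep_debt = 1; cur_longest_streak = 0; longest_streak = 0
--
--   for i in range(len(planned)):
--     # If actual < planned, we are in sleep debt
--     if actual[i] < planned[i]:
--       sleep_debt += planned[i] - actual[i]
--       cur_longest_streak += 1
--     # Otherwise, sleep debt streak broken
--     else:
--       cur_longest_streak = 0
--
--     # Check if we already have longest streak, or we just found new highest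
--     longest_streak = max(longest_streak, cur_longest_streak)
--
--   return sleep_debt, longest_streak
-- ===== SOURCE B (Python) =====
-- def _run_lengths(xs):
--     # run-length encode xs, newest run first: [(value, count), ...]
--     runs = []
--     for x in xs:
--         if runs and runs[0][0] == x:
--             runs[0] = (x, runs[0][1] + 1)
--         else:
--             runs.insert(0, (x, 1))
--     return runs
--
--
-- def calculate_sleep_debt(planned, actual):
--     pairs = list(zip(planned, actual))
--     sleep_debt = 1 + sum(p - a for p, a in pairs if a < p)
--     flags = [a < p for p, a in pairs]
--     longest = max((c for v, c in _run_lengths(flags) if v), default=0)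
--     return sleep_debt, longest
-- ===== Notes on version B (the rewrite author's own statement) =====
-- stated objective: alternative
-- what changed: Replaces A's single fused index loop carrying three running variables by two separate passes over zipped pairs: a direct sum for the debt total and a run-length encoding of the debt flags whose longest true run (max with default 0) gives the streak.
import Mathlib
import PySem

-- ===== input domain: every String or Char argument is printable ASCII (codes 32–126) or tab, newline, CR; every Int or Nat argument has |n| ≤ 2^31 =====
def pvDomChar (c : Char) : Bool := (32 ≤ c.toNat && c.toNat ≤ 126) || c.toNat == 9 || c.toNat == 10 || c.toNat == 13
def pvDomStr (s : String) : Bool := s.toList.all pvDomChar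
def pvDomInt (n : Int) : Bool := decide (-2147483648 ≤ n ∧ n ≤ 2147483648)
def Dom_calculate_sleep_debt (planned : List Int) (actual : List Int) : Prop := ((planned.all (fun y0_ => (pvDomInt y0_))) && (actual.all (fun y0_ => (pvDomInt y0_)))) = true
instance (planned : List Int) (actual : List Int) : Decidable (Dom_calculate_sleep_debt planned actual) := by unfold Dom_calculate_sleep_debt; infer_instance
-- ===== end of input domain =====

-- B computes the two outputs in two separate passes (a direct debt sum over zipped
-- pairs, and the longest true run of a run-length encoding of the debt flags)
-- instead of A's single fused index loop carrying three running variables.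

-- ===== PORT A =====
-- literal port of A's index loop; actual[i]/planned[i] are rendered with getD 0,
-- exact on Pre_ (every accessed index is then in range; out of it Python raises IndexError)
def calculate_sleep_debt (planned : List Int) (actual : List Int) : Int × Int :=
  let st := (List.range planned.length).foldl
    (fun (s : Int × Int × Int) i =>
      if actual.getD i 0 < planned.getD i 0 then
        (s.1 + (planned.getD i 0 - actual.getD i 0), s.2.1 + 1, max s.2.2 (s.2.1 + 1))
      else
        (s.1, 0, max s.2.2 0))
    (1, 0, 0)
  (st.1, st.2.2)

-- ===== PORT B =====
-- run-length encode xs, newest run first (Source B's _run_lengths loop body)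
def pvRLStep (runs : List (Bool × Int)) (x : Bool) : List (Bool × Int) :=
  match runs with
  | (v, c) :: t => if v == x then (v, c + 1) :: t else (x, 1) :: (v, c) :: t
  | [] => [(x, 1)]

def pvRunLengths (xs : List Bool) : List (Bool × Int) := xs.foldl pvRLStep []

def calculate_sleep_debt_alt (planned : List Int) (actual : List Int) : Int × Int :=
  let pairs := planned.zip actual
  let sleep_debt := 1 + pairs.foldl (fun s p => if p.2 < p.1 then s + (p.1 - p.2) else s) 0
  let flags := pairs.map (fun p => decide (p.2 < p.1))
  let longest := (PySem.List.max?
    (((pvRunLengths flags).filter (fun r => r.1)).map (fun r => r.2)) (fun c => c)).getD 0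
  (sleep_debt, longest)

-- ===== PRECONDITION & SPEC =====
-- Pre_ excludes exactly the inputs where actual is shorter than planned, on which A raises IndexError.
def Pre_calculate_sleep_debt (planned : List Int) (actual : List Int) : Prop :=
  planned.length ≤ actual.length
instance (planned : List Int) (actual : List Int) : Decidable (Pre_calculate_sleep_debt planned actual) := by unfold Pre_calculate_sleep_debt; infer_instance

def pvWitness_calculate_sleep_debt : List Int × List Int := ([8, 7, 6], [6, 9, 5])

def Spec_calculate_sleep_debt (planned : List Int) (actual : List Int) (out : Int × Int) : Prop := out = calculate_sleep_debt_alt planned actual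
instance (planned : List Int) (actual : List Int) (out : Int × Int) : Decidable (Spec_calculate_sleep_debt planned actual out) := by unfold Spec_calculate_sleep_debt; infer_instance

-- ===== CLAIM (what is proved, stated in full; the proofs are below) =====
def Claim_equal_calculate_sleep_debt : Prop := ∀ (planned : List Int) (actual : List Int), Dom_calculate_sleep_debt planned actual → Pre_calculate_sleep_debt planned actual → Spec_calculate_sleep_debt planned actual (calculate_sleep_debt planned actual)

-- ===== LEMMAS AND PROOFS =====

-- specification of the longest true streak of a flag list, given the incoming streak length
def pvH (cur : Int) : List Bool → Int
  | [] => 0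
  | f :: t => if f then max (cur + 1) (pvH (cur + 1) t) else pvH 0 t

-- current streak after processing a pair list, given the incoming streak
def pvC (cur : Int) : List (Int × Int) → Int
  | [] => cur
  | p :: t => pvC (if p.2 < p.1 then cur + 1 else 0) t

def pvMaxTrue (rs : List (Bool × Int)) : Int :=
  ((rs.filter (fun r => r.1)).map (fun r => r.2)).foldr max 0

def pvCur : List (Bool × Int) → Int
  | (true, c) :: _ => c
  | _ => 0

lemma pvH_nonneg (fs : List Bool) : ∀ cur, 0 ≤ pvH cur fs := by
  induction fs with
  | nil => intro cur; simp [pvH]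
  | cons f t ih =>
    intro cur
    simp only [pvH]
    split <;> [exact le_trans (ih (cur + 1)) (le_max_right _ _); exact ih 0]

lemma pvMaxTrue_nonneg (rs : List (Bool × Int)) : 0 ≤ pvMaxTrue rs := by
  induction rs with
  | nil => simp [pvMaxTrue]
  | cons r t ih =>
    obtain ⟨v, c⟩ := r
    cases v <;> simp [pvMaxTrue, List.filter] at ih ⊢ <;> omega

-- the run-length fold invariant
lemma pvRL_inv (fs : List Bool) : ∀ rs : List (Bool × Int),
    pvMaxTrue (fs.foldl pvRLStep rs) = max (pvMaxTrue rs) (pvH (pvCur rs) fs) := by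
  induction fs with
  | nil =>
    intro rs
    have := pvMaxTrue_nonneg rs
    simp [pvH]; omega
  | cons x t ih =>
    intro rs
    have hstep : (x :: t).foldl pvRLStep rs = t.foldl pvRLStep (pvRLStep rs x) := rfl
    rw [hstep, ih]
    match rs, x with
    | [], true => simp [pvRLStep, pvCur, pvMaxTrue, pvH]
    | [], false => simp [pvRLStep, pvCur, pvMaxTrue, pvH]
    | (true, c) :: t', true => simp [pvRLStep, pvCur, pvMaxTrue, pvH]; omega
    | (true, c) :: t', false => simp [pvRLStep, pvCur, pvMaxTrue, pvH]
    | (false, c) :: t', true => simp [pvRLStep, pvCur, pvMaxTrue, pvH]; omega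
    | (false, c) :: t', false => simp [pvRLStep, pvCur, pvMaxTrue, pvH]

-- every run produced by the fold has count ≥ 1
lemma pvRL_pos (fs : List Bool) : ∀ rs : List (Bool × Int),
    (∀ r ∈ rs, 1 ≤ r.2) → ∀ r ∈ fs.foldl pvRLStep rs, 1 ≤ r.2 := by
  induction fs with
  | nil => intro rs h; simpa using h
  | cons x t ih =>
    intro rs h
    refine ih (pvRLStep rs x) ?_
    intro r hr
    match rs, x, h with
    | [], x, h => simp [pvRLStep] at hr; simp [hr]
    | (v, c) :: t', x, h =>
      have hc : 1 ≤ c := h (v, c) (by simp)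
      simp only [pvRLStep] at hr
      split at hr
      · rcases List.mem_cons.1 hr with h1 | h1
        · simp [h1]; omega
        · exact h r (List.mem_cons_of_mem _ h1)
      · rcases List.mem_cons.1 hr with h1 | h1
        · simp [h1]
        · exact h r h1

lemma foldl_max_init (t : List Int) : ∀ a : Int, 0 ≤ a → (∀ x ∈ t, 0 ≤ x) →
    t.foldl max a = max a (t.foldr max 0) := by
  induction t with
  | nil => intro a ha _; simp; omega
  | cons x r ih =>
    intro a ha hx
    have h1 : 0 ≤ max a x := le_trans ha (le_max_left _ _)
    have h2 : ∀ y ∈ r, 0 ≤ y := fun y hy => hx y (List.mem_cons_of_mem _ hy)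
    simp only [List.foldl, List.foldr]
    rw [ih (max a x) h1 h2]
    omega

lemma max?_getD_eq_foldr (l : List Int) (h : ∀ x ∈ l, 0 ≤ x) :
    (PySem.List.max? l (fun c => c)).getD 0 = l.foldr max 0 := by
  cases l with
  | nil => simp [PySem.List.max?]
  | cons x t =>
    rw [PySem.List.max?_id_cons]
    simp only [Option.getD_some]
    exact foldl_max_init t x (h x (by simp)) (fun y hy => h y (List.mem_cons_of_mem _ hy))

-- running-sum fold with a shifted initial accumulator
lemma foldl_sum_init (l : List (Int × Int)) : ∀ a : Int,
    l.foldl (fun s p => if p.2 < p.1 then s + (p.1 - p.2) else s) a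
      = a + l.foldl (fun s p => if p.2 < p.1 then s + (p.1 - p.2) else s) 0 := by
  induction l with
  | nil => intro a; simp
  | cons p t ih =>
    intro a
    by_cases h : p.2 < p.1
    · rw [List.foldl_cons, List.foldl_cons, if_pos h, if_pos h,
        ih (a + (p.1 - p.2)), ih (0 + (p.1 - p.2))]
      omega
    · rw [List.foldl_cons, List.foldl_cons, if_neg h, if_neg h]
      exact ih a

-- characterization of the fused zip fold
lemma foldZ_char (l : List (Int × Int)) : ∀ (sd cur lg : Int), 0 ≤ lg →
    l.foldl (fun (s : Int × Int × Int) p =>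
        if p.2 < p.1 then (s.1 + (p.1 - p.2), s.2.1 + 1, max s.2.2 (s.2.1 + 1))
        else (s.1, 0, max s.2.2 0)) (sd, cur, lg)
      = (sd + l.foldl (fun s p => if p.2 < p.1 then s + (p.1 - p.2) else s) 0,
         pvC cur l,
         max lg (pvH cur (l.map fun p => decide (p.2 < p.1)))) := by
  induction l with
  | nil => intro sd cur lg hlg; simp [pvC, pvH]; omega
  | cons p t ih =>
    intro sd cur lg hlg
    by_cases h : p.2 < p.1
    · rw [List.foldl_cons, if_pos h,
        ih (sd + (p.1 - p.2)) (cur + 1) (max lg (cur + 1)) (by omega),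
        List.foldl_cons, if_pos h, foldl_sum_init t (0 + (p.1 - p.2))]
      simp [Prod.mk.injEq, pvC, pvH, h]; omega
    · rw [List.foldl_cons, if_neg h, ih sd 0 (max lg 0) (by omega),
        List.foldl_cons, if_neg h]
      simp [Prod.mk.injEq, pvC, pvH, h]; omega

-- A's index loop over range(len(planned)) equals the fold over the zipped pairs
lemma foldl_range_getD {α β : Type} (l : List β) (d : β) (g : α → β → α) :
    ∀ s : α, (List.range l.length).foldl (fun s i => g s (l.getD i d)) s = l.foldl g s := by
  induction l with
  | nil => intro s; simp
  | cons x t ih =>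
    intro s
    rw [List.length_cons, List.range_succ_eq_map, List.foldl_cons, List.foldl_map]
    simpa using ih (g s x)

lemma A_as_zip (planned actual : List Int) (h : planned.length ≤ actual.length)
    (s : Int × Int × Int) :
    (List.range planned.length).foldl
      (fun (s : Int × Int × Int) i =>
        if actual.getD i 0 < planned.getD i 0 then
          (s.1 + (planned.getD i 0 - actual.getD i 0), s.2.1 + 1, max s.2.2 (s.2.1 + 1))
        else (s.1, 0, max s.2.2 0)) s
    = (planned.zip actual).foldl
        (fun (s : Int × Int × Int) p =>
          if p.2 < p.1 then (s.1 + (p.1 - p.2), s.2.1 + 1, max s.2.2 (s.2.1 + 1))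
          else (s.1, 0, max s.2.2 0)) s := by
  have hlen : (planned.zip actual).length = planned.length := by
    simp [List.length_zip]; omega
  have hget : ∀ i ∈ List.range planned.length,
      planned.getD i 0 = ((planned.zip actual).getD i (0, 0)).1 ∧
      actual.getD i 0 = ((planned.zip actual).getD i (0, 0)).2 := by
    intro i hi
    rw [List.mem_range] at hi
    have hiz : i < (planned.zip actual).length := by omega
    have hia : i < actual.length := by omega
    rw [List.getD_eq_getElem _ _ hiz, List.getD_eq_getElem _ _ hi,
      List.getD_eq_getElem _ _ hia, List.getElem_zip]
    exact ⟨rfl, rfl⟩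
  have hcongr : (List.range planned.length).foldl
      (fun (s : Int × Int × Int) i =>
        if actual.getD i 0 < planned.getD i 0 then
          (s.1 + (planned.getD i 0 - actual.getD i 0), s.2.1 + 1, max s.2.2 (s.2.1 + 1))
        else (s.1, 0, max s.2.2 0)) s
    = (List.range planned.length).foldl
      (fun (s : Int × Int × Int) i =>
        (fun (s : Int × Int × Int) (p : Int × Int) =>
          if p.2 < p.1 then (s.1 + (p.1 - p.2), s.2.1 + 1, max s.2.2 (s.2.1 + 1))
          else (s.1, 0, max s.2.2 0)) s ((planned.zip actual).getD i (0, 0))) s := by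
    refine PySem.List.foldl_congr_mem _ _ _ _ ?_
    intro a i hi
    obtain ⟨h1, h2⟩ := hget i hi
    rw [h1, h2]
  rw [hcongr, ← hlen]
  exact foldl_range_getD (planned.zip actual) (0, 0)
    (fun (s : Int × Int × Int) (p : Int × Int) =>
      if p.2 < p.1 then (s.1 + (p.1 - p.2), s.2.1 + 1, max s.2.2 (s.2.1 + 1))
      else (s.1, 0, max s.2.2 0)) s

-- ===== VERDICT (by name: the statement is the Claim_ definition above) =====
theorem calculate_sleep_debt_spec : Claim_equal_calculate_sleep_debt := by
  intro planned actual _ hpre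
  unfold Spec_calculate_sleep_debt calculate_sleep_debt calculate_sleep_debt_alt
  simp only []
  rw [A_as_zip planned actual hpre, foldZ_char (planned.zip actual) 1 0 0 le_rfl]
  have hmax : (PySem.List.max?
      (((pvRunLengths (List.map (fun p => decide (p.2 < p.1)) (planned.zip actual))).filter
        (fun r => r.1)).map (fun r => r.2)) (fun c => c)).getD 0
      = pvMaxTrue (pvRunLengths (List.map (fun p => decide (p.2 < p.1)) (planned.zip actual))) := by
    rw [max?_getD_eq_foldr]
    · rfl
    · intro x hx
      simp only [List.mem_map, List.mem_filter] at hx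
      obtain ⟨r, ⟨hr, _⟩, hx⟩ := hx
      have := pvRL_pos (List.map (fun p : Int × Int => decide (p.2 < p.1)) (planned.zip actual)) []
        (by simp) r (by simpa [pvRunLengths] using hr)
      omega
  rw [hmax, pvRunLengths, pvRL_inv]
  have h0 := pvH_nonneg (List.map (fun p => decide (p.2 < p.1)) (planned.zip actual)) 0
  simp [pvMaxTrue, pvCur]
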